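-- pv_equiv track=rewrite | github.com/mattgraham93/mtgecorec | scripts/create_combo_collection.py | parse_description_to_steps
-- ===== SOURCE A (Python) =====
-- from typing import List, Dict, Any, Optional
--
-- def parse_description_to_steps(description: str) -> List[str]:
--     """
--     Parse combo description into step-by-step list.
--
--     Args:
--         description: Raw description text
--
--     Returns:
--         List of steps
--     """
--     if not description:
--         return []
--
--     # Split on periods, numbers, or line breaks
--     # Clean up and filter empty lines
--     steps = []
--
--     # Try splitting on numbered steps first (1. 2. 3.)
--     if any(f"{i}." in description for i in range(1, 10)):
--         parts = description.split('.')
--         current_step = ""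
--         for part in parts:
--             part = part.strip()
--             if part:
--                 # Check if starts with a number
--                 if part and part[0].isdigit():
--                     if current_step:
--                         steps.append(current_step)
--                     current_step = part[part.index(' ')+1:] if ' ' in part else part
--                 else:
--                     current_step += '. ' + part if current_step else part
--         if current_step:
--             steps.append(current_step)
--     else:
--         # Fall back to sentence splitting
--         steps = [s.strip() for s in description.split('.') if s.strip()]
--
--     return steps if steps else [description]
-- ===== SOURCE B (Python) =====
-- def _render_group(g):
--     """Render one group of sentence parts into a single step string."""
--     head = g[0]
--     if head[0].isdigit():
--         head = head[head.index(' ')+1:] if ' ' in head else head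
--     return head + ''.join('. ' + p for p in g[1:])
--
--
-- def parse_description_to_steps(description):
--     """
--     Parse combo description into step-by-step list.
--
--     Args:
--         description: Raw description text
--
--     Returns:
--         List of steps
--     """
--     if not description:
--         return []
--
--     if any(f"{i}." in description for i in range(1, 10)):
--         parts = [p.strip() for p in description.split('.') if p.strip()]
--         # Partition the parts into groups: a new group starts at every part
--         # whose first character is a digit; leading non-digit parts form the
--         # initial group.  Each group renders to one step.
--         groups = []
--         for p in parts:
--             if not groups or p[0].isdigit():
--                 groups.append([p])
--             else:
--                 groups[-1].append(p)
--         steps = [_render_group(g) for g in groups]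
--     else:
--         steps = [s.strip() for s in description.split('.') if s.strip()]
--
--     return steps if steps else [description]
-- ===== Notes on version B (the rewrite author's own statement) =====
-- stated objective: alternative
-- what changed: Replaces A's single accumulator loop (strip/filter, current_step string, deferred appends) by a pipeline: strip-and-filter the parts once, partition them into groups starting at each digit-led part, then render each group to one step.
import Mathlib
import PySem

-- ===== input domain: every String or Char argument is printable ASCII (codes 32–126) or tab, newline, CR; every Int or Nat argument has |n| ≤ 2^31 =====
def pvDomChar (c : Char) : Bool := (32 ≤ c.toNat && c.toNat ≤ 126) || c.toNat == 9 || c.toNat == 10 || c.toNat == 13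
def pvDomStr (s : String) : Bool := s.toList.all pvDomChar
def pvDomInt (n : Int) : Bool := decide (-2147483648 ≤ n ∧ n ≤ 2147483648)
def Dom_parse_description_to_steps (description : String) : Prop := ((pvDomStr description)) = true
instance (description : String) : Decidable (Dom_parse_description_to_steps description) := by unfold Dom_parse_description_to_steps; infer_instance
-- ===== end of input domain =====

-- B replaces A's single accumulator loop by a strip/filter → group-at-digit-parts → render-each-group pipeline (objective: alternative decomposition, same cost).

-- ===== PORT A =====
-- helpers shared by both ports (the same Python subexpressions occur in A and in B):
-- part[0].isdigit() guarded by nonemptiness of part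
def pvHeadDigit (s : String) : Bool :=
  match PySem.Str.pyGet? s 0 with
  | some c => PySem.Chars.isdigit c
  | none => false

-- part[part.index(' ')+1:] if ' ' in part else part  ('.index' is guarded by the 'in' test, so 'find' is exact here)
def pvStripNum (s : String) : String :=
  if PySem.Str.isIn " " s then PySem.Str.slice s (some (PySem.Str.find s " " + 1)) none else s

-- any(f"{i}." in description for i in range(1, 10))
def pvNumGuard (description : String) : Bool :=
  (PySem.List.pyRange 1 10 1).any (fun i => PySem.Str.isIn (PySem.Int.toStr i ++ ".") description)

-- the body of A's for-loop on an already stripped, nonempty part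
def pvStepA (st : List String × String) (part : String) : List String × String :=
  if (!(part == "")) && pvHeadDigit part then
    (if st.2 ≠ "" then st.1 ++ [st.2] else st.1, pvStripNum part)
  else
    (st.1, if st.2 ≠ "" then st.2 ++ ". " ++ part else part)

-- one iteration of A's for-loop: strip, skip if empty
def pvLoopA (st : List String × String) (part0 : String) : List String × String :=
  let part := PySem.Str.strip part0
  if part ≠ "" then pvStepA st part else st

def parse_description_to_steps (description : String) : List String :=
  if description = "" then []
  else if pvNumGuard description then
    -- sep "." ≠ "" so split? is always some; getD is exact
    let parts := (PySem.Str.split? description ".").getD []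
    let st := parts.foldl pvLoopA ([], "")
    let steps := if st.2 ≠ "" then st.1 ++ [st.2] else st.1
    if steps ≠ [] then steps else [description]
  else
    let steps := (((PySem.Str.split? description ".").getD []).map PySem.Str.strip).filter (· ≠ "")
    if steps ≠ [] then steps else [description]

-- ===== PORT B =====
-- _render_group: head (number prefix stripped when digit-led) ++ '. '-joined rest
def pvRenderGroup (g : List String) : String :=
  match g with
  | [] => ""
  | h :: t => (if pvHeadDigit h then pvStripNum h else h) ++ PySem.Str.join "" (t.map (fun p => ". " ++ p))

-- the body of B's grouping loop: start a new group or extend the last one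
def pvGroupStep (gs : List (List String)) (p : String) : List (List String) :=
  if gs.isEmpty || pvHeadDigit p then gs ++ [[p]]
  else gs.dropLast ++ [gs.getLastD [] ++ [p]]

def parse_description_to_steps_alt (description : String) : List String :=
  if description = "" then []
  else
    let steps :=
      if pvNumGuard description then
        let parts := (((PySem.Str.split? description ".").getD []).map PySem.Str.strip).filter (· ≠ "")
        let groups := parts.foldl pvGroupStep []
        groups.map pvRenderGroup
      else
        (((PySem.Str.split? description ".").getD []).map PySem.Str.strip).filter (· ≠ "")
    if steps ≠ [] then steps else [description]

-- ===== PRECONDITION & SPEC =====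
def Spec_parse_description_to_steps (description : String) (out : List String) : Prop := out = parse_description_to_steps_alt description
instance (description : String) (out : List String) : Decidable (Spec_parse_description_to_steps description out) := by unfold Spec_parse_description_to_steps; infer_instance

-- ===== CLAIM (what is proved, stated in full; the proofs are below) =====
def Claim_equal_parse_description_to_steps : Prop := ∀ (description : String), Dom_parse_description_to_steps description → Spec_parse_description_to_steps description (parse_description_to_steps description)

-- ===== LEMMAS AND PROOFS =====

-- the B-side state that an A-side loop state corresponds to: the rendered finished
-- groups are A's appended steps, the rendering of the open last group is A's current_step
def pvStateOf (gs : List (List String)) : List String × String :=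
  (gs.dropLast.map pvRenderGroup, match gs.getLast? with | some g => pvRenderGroup g | none => "")

-- a stripped string never ends in a whitespace character
theorem pv_strip_last_not_space (l : List Char) (c : Char)
    (h : (PySem.Chars.strip l).getLast? = some c) : PySem.Chars.isspace c = false := by
  unfold PySem.Chars.strip PySem.Chars.rstrip at h
  rw [List.getLast?_reverse] at h
  rcases hd : (PySem.Chars.lstrip l).reverse.dropWhile PySem.Chars.isspace with _ | ⟨a, t⟩
  · simp [hd] at h
  · have hne : (PySem.Chars.lstrip l).reverse.dropWhile PySem.Chars.isspace ≠ [] := by simp [hd]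
    have := List.head_dropWhile_not (p := PySem.Chars.isspace) hne
    simp [hd] at this h
    rwa [h] at this

-- dropping through the first space of a list whose last element is no whitespace leaves a nonempty rest
theorem pv_drop_space_ne (l : List Char)
    (hlast : ∀ c, l.getLast? = some c → PySem.Chars.isspace c = false)
    (hfind : 0 ≤ PySem.Chars.find l [' ']) :
    l.drop (PySem.Chars.find l [' '] + 1).toNat ≠ [] := by
  obtain ⟨hpre, -⟩ := PySem.Chars.find_spec (s := l) (sub := [' ']) hfind
  set k : Int := PySem.Chars.find l [' '] with hk
  obtain ⟨t, ht⟩ := hpre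
  have hget : l[k.toNat]? = some ' ' := by
    have h0 : (l.drop k.toNat)[0]? = some ' ' := by rw [← ht]; rfl
    simpa [List.getElem?_drop] using h0
  have hklen : k.toNat < l.length := (List.getElem?_eq_some_iff.mp hget).1
  intro hnil
  have hge : l.length ≤ (k + 1).toNat := List.drop_eq_nil_iff.mp hnil
  have hkeq : k.toNat = l.length - 1 := by omega
  have hlastget : l.getLast? = some ' ' := by
    rw [List.getLast?_eq_getElem?, ← hkeq]
    exact hget
  have := hlast ' ' hlastget
  simp [PySem.Chars.isspace] at this

-- on a nonempty stripped part, stripping the number prefix still leaves a nonempty string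
theorem pv_stripNum_ne (y : String) (h : PySem.Str.strip y ≠ "") :
    pvStripNum (PySem.Str.strip y) ≠ "" := by
  unfold pvStripNum
  by_cases hin : PySem.Str.isIn " " (PySem.Str.strip y) = true
  · simp only [hin, if_true]
    have hsl : (PySem.Str.strip y).toList = PySem.Chars.strip y.toList := by
      simp [PySem.Str.strip]
    have hfind : 0 ≤ PySem.Str.find (PySem.Str.strip y) " " := by
      rw [PySem.Str.find_nonneg_iff]
      rw [PySem.Str.isIn_iff_infix] at hin
      exact hin
    intro hemp
    have htl : (PySem.Str.slice (PySem.Str.strip y) (some (PySem.Str.find (PySem.Str.strip y) " " + 1)) none).toList = [] := by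
      rw [hemp]; rfl
    rw [PySem.Str.toList_slice, PySem.Chars.slice_eq_listSlice,
      PySem.List.slice_from _ (by omega : (0:Int) ≤ PySem.Str.find (PySem.Str.strip y) " " + 1)] at htl
    have hfind' : PySem.Str.find (PySem.Str.strip y) " " = PySem.Chars.find (PySem.Str.strip y).toList [' '] := rfl
    refine pv_drop_space_ne (PySem.Str.strip y).toList ?_ ?_ ?_
    · intro c hc
      exact pv_strip_last_not_space y.toList c (by rwa [hsl] at hc)
    · rw [← hfind']; exact hfind
    · rw [← hfind']; exact htl
  · simp only [hin]
    exact h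

-- ''.join over one more piece
theorem pv_join_concat (xs : List String) (y : String) :
    PySem.Str.join "" (xs ++ [y]) = PySem.Str.join "" xs ++ y := by
  have hfl : ∀ l : List (List Char), (List.intersperse ([] : List Char) l).flatten = l.flatten := by
    intro l
    induction l with
    | nil => rfl
    | cons a t ih => cases t <;> simp_all [List.intersperse]
  apply String.toList_inj.mp
  simp [PySem.Str.join, PySem.Chars.join, List.intercalate, hfl]

theorem pv_render_concat (h : String) (t : List String) (p : String) :
    pvRenderGroup (h :: (t ++ [p])) = pvRenderGroup (h :: t) ++ (". " ++ p) := by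
  simp only [pvRenderGroup, List.map_append, List.map_cons, List.map_nil]
  rw [pv_join_concat, ← String.append_assoc]

theorem pv_render_single (p : String) :
    pvRenderGroup [p] = if pvHeadDigit p then pvStripNum p else p := by
  simp [pvRenderGroup, PySem.Str.join, PySem.Chars.join, List.intercalate]

theorem pv_render_ne (h : String) (t : List String) (hh : h ≠ "")
    (hd : pvHeadDigit h = true → pvStripNum h ≠ "") : pvRenderGroup (h :: t) ≠ "" := by
  simp only [pvRenderGroup]
  intro hemp
  rcases String.append_eq_empty_iff.mp hemp with ⟨h1, -⟩
  by_cases hdig : pvHeadDigit h = true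
  · exact hd hdig (by simpa [hdig] using h1)
  · simp only [hdig] at h1
    exact hh h1

theorem pv_append_ne (s t : String) (hs : s ≠ "") : s ++ t ≠ "" := by
  intro hemp
  exact hs (String.append_eq_empty_iff.mp hemp).1

theorem pv_stateOf_concat (gs : List (List String)) (g : List String) :
    pvStateOf (gs ++ [g]) = (gs.map pvRenderGroup, pvRenderGroup g) := by
  simp [pvStateOf]

theorem pv_groupStep_concat (gs : List (List String)) (g : List String) (p : String) :
    pvGroupStep (gs ++ [g]) p =
      if pvHeadDigit p then (gs ++ [g]) ++ [[p]] else gs ++ [g ++ [p]] := by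
  by_cases hdig : pvHeadDigit p = true <;>
    simp [pvGroupStep, hdig]

-- A's loop over the raw parts is its core step over the stripped, nonempty parts
theorem pv_loop_filter (parts : List String) (st : List String × String) :
    parts.foldl pvLoopA st = ((parts.map PySem.Str.strip).filter (· ≠ "")).foldl pvStepA st := by
  induction parts generalizing st with
  | nil => rfl
  | cons p ps ih =>
    by_cases hp : PySem.Str.strip p ≠ "" <;>
      simp [pvLoopA, hp, ih]

-- main invariant: A's accumulator state tracks B's groups
theorem pv_main (L : List String) : ∀ (gs : List (List String)),
    (∀ p ∈ L, p ≠ "" ∧ (pvHeadDigit p = true → pvStripNum p ≠ "")) →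
    (∀ g ∈ gs, g ≠ [] ∧ pvRenderGroup g ≠ "") →
    (let st := L.foldl pvStepA (pvStateOf gs);
     if st.2 ≠ "" then st.1 ++ [st.2] else st.1) = (L.foldl pvGroupStep gs).map pvRenderGroup := by
  induction L with
  | nil =>
    intro gs _ hgs
    rcases List.eq_nil_or_concat' gs with rfl | ⟨gs', g, rfl⟩
    · simp [pvStateOf]
    · have hg := (hgs g (by simp)).2
      rw [pv_stateOf_concat]
      simp [hg]
  | cons p L ih =>
    intro gs hL hgs
    have hp := hL p (by simp)
    have hL' : ∀ q ∈ L, q ≠ "" ∧ (pvHeadDigit q = true → pvStripNum q ≠ "") :=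
      fun q hq => hL q (by simp [hq])
    have hstep : pvStepA (pvStateOf gs) p = pvStateOf (pvGroupStep gs p) := by
      rcases List.eq_nil_or_concat' gs with rfl | ⟨gs', g, rfl⟩
      · by_cases hdig : pvHeadDigit p = true <;>
          simp [pvStepA, pvGroupStep, pvStateOf, hp.1, hdig, pv_render_single]
      · obtain ⟨hgne, hgr⟩ := hgs g (by simp)
        rw [pv_stateOf_concat, pv_groupStep_concat]
        by_cases hdig : pvHeadDigit p = true
        · rw [if_pos hdig, pv_stateOf_concat]
          simp [pvStepA, hp.1, hdig, hgr, pv_render_single]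
        · rw [if_neg hdig, pv_stateOf_concat]
          obtain ⟨h, t, rfl⟩ := List.exists_cons_of_ne_nil hgne
          simp [pvStepA, hdig, hgr, pv_render_concat, String.append_assoc]
    have hinv : ∀ g2 ∈ pvGroupStep gs p, g2 ≠ [] ∧ pvRenderGroup g2 ≠ "" := by
      intro g2 hgmem
      rcases List.eq_nil_or_concat' gs with rfl | ⟨gs', g, rfl⟩
      · simp only [pvGroupStep, List.isEmpty_nil, Bool.true_or, if_true,
          List.nil_append, List.mem_singleton] at hgmem
        subst hgmem
        exact ⟨by simp, pv_render_ne p [] hp.1 hp.2⟩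
      · obtain ⟨hgne, hgr⟩ := hgs g (by simp)
        rw [pv_groupStep_concat] at hgmem
        by_cases hdig : pvHeadDigit p = true
        · rw [if_pos hdig] at hgmem
          rcases List.mem_append.mp hgmem with hmem | hmem
          · exact hgs g2 hmem
          · simp only [List.mem_singleton] at hmem
            subst hmem
            exact ⟨by simp, pv_render_ne p [] hp.1 hp.2⟩
        · rw [if_neg hdig] at hgmem
          rcases List.mem_append.mp hgmem with hmem | hmem
          · exact hgs g2 (by simp [hmem])
          · simp only [List.mem_singleton] at hmem
            subst hmem
            obtain ⟨h, t, rfl⟩ := List.exists_cons_of_ne_nil hgne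
            refine ⟨by simp, ?_⟩
            rw [List.cons_append, pv_render_concat]
            exact pv_append_ne _ _ hgr
    simp only [List.foldl_cons, hstep]
    exact ih (pvGroupStep gs p) hL' hinv

-- ===== VERDICT (by name: the statement is the Claim_ definition above) =====
theorem parse_description_to_steps_spec : Claim_equal_parse_description_to_steps := by
  intro description _
  unfold Spec_parse_description_to_steps parse_description_to_steps parse_description_to_steps_alt
  by_cases h0 : description = ""
  · simp [h0]
  · simp only [h0, if_false]
    by_cases hg : pvNumGuard description = true
    · simp only [hg, if_true]
      rw [pv_loop_filter]
      have key := pv_main ((((PySem.Str.split? description ".").getD []).map PySem.Str.strip).filter (· ≠ "")) []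
        (by
          intro p hp
          simp only [List.mem_filter, List.mem_map] at hp
          obtain ⟨⟨y, _, rfl⟩, hne⟩ := hp
          simp only [decide_not, Bool.not_eq_eq_eq_not, Bool.not_true, decide_eq_false_iff_not] at hne
          exact ⟨hne, fun _ => pv_stripNum_ne y hne⟩)
        (by intro g hg; simp at hg)
      simp only [pvStateOf, List.dropLast_nil, List.map_nil, List.getLast?_nil] at key
      rw [key]
    · simp [hg]
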